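-- pv_equiv track=rewrite | github.com/moo-on/Algorithm | programmers/problems/모든문제/구현/구현_문자열처리3.py | solution
-- ===== SOURCE A (Python) =====
-- from collections import defaultdict
--
-- def solution(id_list, k):
--     answer = 0
--     customer_dict = defaultdict(int)
--
--     for strings in id_list:
--         day_lst = set(strings.split())
--         for e in day_lst:
--             customer_dict[e] += 1
--
--     for i in customer_dict.values():
--         if i > k: i = k
--         answer += i
--
--     return answer
-- ===== SOURCE B (Python) =====
-- from itertools import groupby
--
-- def solution(id_list, k):
--     ids = []
--     for strings in id_list:
--         ids.extend(set(strings.split()))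
--     ids.sort()
--     answer = 0
--     for _, grp in groupby(ids):
--         answer += min(len(list(grp)), k)
--     return answer
-- ===== Notes on version B (the rewrite author's own statement) =====
-- stated objective: alternative
-- what changed: Replaces the defaultdict hash-count aggregation with flattening all per-line deduplicated IDs into one list, sorting it, and summing min(run length, k) over itertools.groupby runs.
import Mathlib
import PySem

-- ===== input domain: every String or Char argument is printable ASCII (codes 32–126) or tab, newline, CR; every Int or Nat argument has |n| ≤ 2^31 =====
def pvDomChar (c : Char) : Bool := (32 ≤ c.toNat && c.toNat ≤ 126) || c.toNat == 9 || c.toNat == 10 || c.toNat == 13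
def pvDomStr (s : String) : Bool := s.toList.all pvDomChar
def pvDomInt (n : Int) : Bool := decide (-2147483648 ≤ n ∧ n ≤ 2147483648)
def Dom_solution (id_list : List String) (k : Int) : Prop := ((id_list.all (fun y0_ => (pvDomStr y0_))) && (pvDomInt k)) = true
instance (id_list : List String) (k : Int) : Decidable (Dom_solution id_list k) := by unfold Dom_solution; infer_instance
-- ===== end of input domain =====

-- B replaces A's defaultdict counting with flatten–sort–group-runs; alternative decomposition, same return value.

-- ===== PORT A =====
def solution (id_list : List String) (k : Int) : Int :=
  let customer_dict : PySem.Dict String Int :=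
    id_list.foldl
      (fun d strings =>
        (PySem.Set.ofList (PySem.Str.split₀ strings)).foldl
          (fun d e => d.modify e 0 (· + 1)) d)
      PySem.Dict.empty
  customer_dict.values.foldl (fun answer i => answer + (if i > k then k else i)) 0

-- ===== PORT B =====
-- hand port of the groupby consumption loop: each run of equal adjacent ids contributes min(run length, k)
def runSum (k : Int) : List String → Int
  | [] => 0
  | x :: xs =>
      min (((xs.takeWhile (fun y => y == x)).length + 1 : Nat) : Int) k
        + runSum k (xs.dropWhile (fun y => y == x))
termination_by l => l.length
decreasing_by
  simp only [List.length_cons]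
  exact Nat.lt_succ_of_le (List.length_dropWhile_le _ _)

def solution_alt (id_list : List String) (k : Int) : Int :=
  let ids : List String :=
    id_list.foldl (fun acc strings => acc ++ PySem.Set.ofList (PySem.Str.split₀ strings)) []
  runSum k (PySem.List.sorted ids (fun x => x) false)

-- ===== PRECONDITION & SPEC =====
def Spec_solution (id_list : List String) (k : Int) (out : Int) : Prop := out = solution_alt id_list k
instance (id_list : List String) (k : Int) (out : Int) : Decidable (Spec_solution id_list k out) := by unfold Spec_solution; infer_instance

-- ===== CLAIM (what is proved, stated in full; the proofs are below) =====
def Claim_equal_solution : Prop := ∀ (id_list : List String) (k : Int), Dom_solution id_list k → Spec_solution id_list k (solution id_list k)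

-- ===== LEMMAS AND PROOFS =====

-- the sorted run-walk equals the capped-count sum over any duplicate-free enumeration of its elements
lemma runSum_eq (k : Int) (n : Nat) : ∀ (S : List String), S.length ≤ n → S.Pairwise (· ≤ ·) →
    ∀ es : List String, es.Nodup → (∀ e, e ∈ es ↔ e ∈ S) →
    runSum k S = (es.map (fun e => min ((S.count e : Nat) : Int) k)).sum := by
  induction n with
  | zero =>
    intro S hlen _ es hnd hmem
    have hS : S = [] := List.eq_nil_of_length_eq_zero (Nat.le_zero.mp hlen)
    subst hS
    have : es = [] := List.eq_nil_iff_forall_not_mem.mpr (fun e he => by simpa using (hmem e).mp he)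
    subst this
    simp [runSum]
  | succ n ih =>
    intro S hlen hsorted es hnd hmem
    match S, hlen, hsorted with
    | [], _, _ =>
      have : es = [] := List.eq_nil_iff_forall_not_mem.mpr (fun e he => by simpa using (hmem e).mp he)
      subst this
      simp [runSum]
    | x :: xs, hlen, hsorted =>
      set t := xs.takeWhile (fun y => y == x) with ht_def
      set d := xs.dropWhile (fun y => y == x) with hd_def
      have htd : t ++ d = xs := List.takeWhile_append_dropWhile
      have ht : ∀ y ∈ t, y = x := fun y hy => by
        have := List.mem_takeWhile_imp hy; simpa using this
      have hx_le : ∀ y ∈ xs, x ≤ y := (List.pairwise_cons.mp hsorted).1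
      have hxs : xs.Pairwise (· ≤ ·) := (List.pairwise_cons.mp hsorted).2
      have hd_sorted : d.Pairwise (· ≤ ·) := hxs.sublist (List.dropWhile_sublist _)
      have hxd : x ∉ d := by
        intro hx
        obtain ⟨y₀, d', hd⟩ := List.exists_cons_of_ne_nil (List.ne_nil_of_mem hx)
        have hdw : xs.dropWhile (fun y => y == x) = y₀ :: d' := by rw [← hd_def]; exact hd
        have hne : xs.dropWhile (fun y => y == x) ≠ [] := by simp [hdw]
        have hy0 : (y₀ == x) = false := by
          have h1 : (xs.dropWhile (fun y => y == x)).head hne = y₀ := by simp [hdw]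
          have h2 := List.head_dropWhile_not (fun y => y == x) (l := xs) hne
          rwa [h1] at h2
        have hy0ne : y₀ ≠ x := by simpa using hy0
        have hxle : x ≤ y₀ := hx_le y₀ (by rw [← htd, hd]; simp)
        have hylex : y₀ ≤ x := by
          rcases List.mem_cons.mp (hd ▸ hx) with h | h
          · exact (hy0ne h.symm).elim
          · rw [hd] at hd_sorted
            exact (List.pairwise_cons.mp hd_sorted).1 x h
        exact hy0ne (le_antisymm hylex hxle)
      have hcount_t : t.count x = t.length := List.count_eq_length.mpr (fun b hb => (ht b hb).symm)
      have cx : (x :: xs).count x = t.length + 1 := by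
        rw [List.count_cons_self, ← htd, List.count_append, hcount_t,
          List.count_eq_zero.mpr hxd]
      have ce : ∀ e, e ≠ x → (x :: xs).count e = d.count e := by
        intro e he
        have het : e ∉ t := fun hmem => he (ht e hmem)
        rw [List.count_cons_of_ne (Ne.symm he), ← htd, List.count_append, List.count_eq_zero.mpr het,
          Nat.zero_add]
      have hmemd : ∀ e, e ∈ d ↔ (e ∈ x :: xs ∧ e ≠ x) := by
        intro e
        constructor
        · intro he
          have hexs : e ∈ xs := by rw [← htd]; exact List.mem_append_right _ he
          exact ⟨List.mem_cons_of_mem _ hexs, fun h => hxd (h ▸ he)⟩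
        · rintro ⟨he, hne⟩
          rcases List.mem_cons.mp he with h | h
          · exact (hne h).elim
          · rw [← htd] at h
            rcases List.mem_append.mp h with h | h
            · exact (hne (ht e h)).elim
            · exact h
      -- instantiate the IH on the tail run
      have hdlen : d.length ≤ n := by
        have h1 : d.length ≤ xs.length := List.length_dropWhile_le _ _
        have h2 : xs.length ≤ n := by simpa using hlen
        omega
      have hx_es : x ∈ es := (hmem x).mpr List.mem_cons_self
      have hnd' : (es.erase x).Nodup := hnd.erase x
      have hmem' : ∀ e, e ∈ es.erase x ↔ e ∈ d := by
        intro e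
        rw [hnd.mem_erase_iff, hmemd, hmem, and_comm]
      have hIH := ih d hdlen hd_sorted (es.erase x) hnd' hmem'
      have hperm : es.Perm (x :: es.erase x) := List.perm_cons_erase hx_es
      have hsum : (es.map (fun e => min ((((x :: xs).count e : Nat)) : Int) k)).sum
          = min ((((x :: xs).count x : Nat)) : Int) k
            + ((es.erase x).map (fun e => min ((((x :: xs).count e : Nat)) : Int) k)).sum := by
        rw [(hperm.map _).sum_eq]; simp
      have hmapc : (es.erase x).map (fun e => min ((((x :: xs).count e : Nat)) : Int) k)
          = (es.erase x).map (fun e => min (((d.count e : Nat)) : Int) k) := by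
        apply List.map_congr_left
        intro e he
        have hne : e ≠ x := (hnd.mem_erase_iff.mp he).1
        rw [ce e hne]
      rw [runSum, hsum, hmapc, ← hIH, cx, ← ht_def, ← hd_def]

lemma foldl_nested {A B C : Type} (l : List A) (g : A → List B) (step : C → B → C)
    (init : C) :
    l.foldl (fun acc s => (g s).foldl step acc) init = (l.flatMap g).foldl step init := by
  induction l generalizing init with
  | nil => rfl
  | cons a l ihl => simp [List.flatMap_cons, List.foldl_append, ihl]

lemma min_eq_if (v k : Int) : (if v > k then k else v) = min v k := by
  split_ifs <;> omega

-- ===== VERDICT (by name: the statement is the Claim_ definition above) =====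
theorem solution_spec : Claim_equal_solution := by
  intro id_list k _
  unfold Spec_solution solution solution_alt
  set L : List String := id_list.flatMap (fun s => PySem.Set.ofList (PySem.Str.split₀ s)) with hL
  set S : List String := PySem.List.sorted L (fun x => x) false with hS
  -- A side: nested loop = counter over the flattened list, then a capped sum over its values
  rw [foldl_nested, ← hL]
  have hA : (L.foldl (fun d x => d.modify x 0 (· + 1)) PySem.Dict.empty) = PySem.Dict.counter L :=
    (PySem.Dict.counter_eq_foldl L).symm
  rw [hA, PySem.List.foldl_add]
  have hvals : (PySem.Dict.counter L).values
      = (PySem.Set.ofList L).map (fun e => ((L.count e : Nat) : Int)) := by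
    simp [PySem.Dict.values, PySem.Dict.items_counter]
  rw [hvals, List.map_map]
  -- B side: the appended list is the same flattened list
  rw [PySem.List.foldl_append_eq_flatMap, List.nil_append, ← hL]
  show _ = runSum k S
  have hperm : S.Perm L := PySem.List.sorted_perm L (fun x => x) false
  have hB : runSum k S = ((PySem.Set.ofList L).map (fun e => min ((S.count e : Nat) : Int) k)).sum := by
    apply runSum_eq k S.length S le_rfl
    · exact PySem.List.sorted_pairwise L (fun x => x)
    · exact PySem.Set.nodup_ofList L
    · intro e
      rw [PySem.Set.mem_ofList]
      exact (hperm.mem_iff).symm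
  rw [hB]
  rw [zero_add]
  apply congrArg
  apply List.map_congr_left
  intro e _
  rw [Function.comp_apply, hperm.count_eq, min_eq_if]
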